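-- pv_equiv track=rewrite | github.com/taclo2/Ondes | FRequnece.py | combi_modes
-- ===== SOURCE A (Python) =====
-- def combi_modes(n1, m1, nb_f):
--     N = [(n1,)]
--     M = [(m1,)]
--
--     for i in range(nb_f):
--         ajout_n = tuple()
--         ajout_m = tuple()
--
--         for n in N[i]:
--             ajout_n += (n, n+2, n+2)
--
--         for m in M[i]:
--             ajout_m += (m+2, m, m+2)
--
--
--         N.append(ajout_n)
--         M.append(ajout_m)
--
--     return N, M
-- ===== SOURCE B (Python) =====
-- def combi_modes(n1, m1, nb_f):
--     # Each level i is computed directly: element k of level i is determined by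
--     # the i base-3 digits of k (the branch choices along the path from the root).
--     levels = max(nb_f, 0) + 1
--     N = []
--     M = []
--     for i in range(levels):
--         row_n = []
--         row_m = []
--         for k in range(3 ** i):
--             cn = 0
--             cm = 0
--             x = k
--             for _ in range(i):
--                 d = x % 3
--                 if d != 0:
--                     cn += 1
--                 if d != 1:
--                     cm += 1
--                 x //= 3
--             row_n.append(n1 + 2 * cn)
--             row_m.append(m1 + 2 * cm)
--         N.append(tuple(row_n))
--         M.append(tuple(row_m))
--     return N, M
-- ===== Notes on version B (the rewrite author's own statement) =====
-- stated objective: alternative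
-- what changed: Replaces A's level-to-level tuple-tripling recurrence with a direct per-level closed form: element k of level i is n1/m1 plus twice the number of base-3 digits of k that differ from 0 (resp. 1), so each level is computed independently of the previous one.
import Mathlib
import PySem

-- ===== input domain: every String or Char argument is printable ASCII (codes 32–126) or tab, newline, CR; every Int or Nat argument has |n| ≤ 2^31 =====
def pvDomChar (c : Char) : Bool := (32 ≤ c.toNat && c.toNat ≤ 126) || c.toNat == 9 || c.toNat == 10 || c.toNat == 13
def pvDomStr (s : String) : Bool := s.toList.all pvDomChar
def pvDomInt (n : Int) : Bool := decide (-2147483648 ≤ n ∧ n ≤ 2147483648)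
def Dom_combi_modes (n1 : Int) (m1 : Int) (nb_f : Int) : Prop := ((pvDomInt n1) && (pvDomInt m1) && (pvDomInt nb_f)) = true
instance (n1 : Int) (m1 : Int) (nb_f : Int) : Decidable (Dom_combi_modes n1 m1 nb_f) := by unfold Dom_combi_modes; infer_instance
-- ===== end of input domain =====

-- B replaces A's level-to-level tuple-tripling recurrence by a direct per-level
-- formula: element k of level i is read off the base-3 digits of k (objective: alternative).

-- ===== PORT A =====
-- N[i] / M[i] are always in range while the loop runs (the list has i+1 elements
-- when index i is read), so pyGetD's default [] is never used.
def combi_modes (n1 : Int) (m1 : Int) (nb_f : Int) : List (List Int) × List (List Int) :=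
  (PySem.List.pyRange 0 nb_f 1).foldl
    (fun NM i =>
      let ajout_n := (PySem.List.pyGetD NM.1 i []).foldl (fun acc n => acc ++ [n, n + 2, n + 2]) []
      let ajout_m := (PySem.List.pyGetD NM.2 i []).foldl (fun acc m => acc ++ [m + 2, m, m + 2]) []
      (NM.1 ++ [ajout_n], NM.2 ++ [ajout_m]))
    ([[n1]], [[m1]])

-- ===== PORT B =====
-- Python's 3 ** i is ported as (3 : Int) ^ i.toNat; exact here since the loop
-- index i is always ≥ 0.
def combi_modes_alt (n1 : Int) (m1 : Int) (nb_f : Int) : List (List Int) × List (List Int) :=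
  let levels := max nb_f 0 + 1
  (PySem.List.pyRange 0 levels 1).foldl
    (fun NM i =>
      let rows := (PySem.List.pyRange 0 ((3 : Int) ^ i.toNat) 1).foldl
        (fun (rows : List Int × List Int) k =>
          let c := (PySem.List.pyRange 0 i 1).foldl
            (fun (acc : Int × Int × Int) _ =>
              let d := PySem.Int.mod acc.2.2 3
              ((if d ≠ 0 then acc.1 + 1 else acc.1),
               (if d ≠ 1 then acc.2.1 + 1 else acc.2.1),
               PySem.Int.floordiv acc.2.2 3))
            (0, 0, k)
          (rows.1 ++ [n1 + 2 * c.1], rows.2 ++ [m1 + 2 * c.2.1]))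
        (([], []) : List Int × List Int)
      (NM.1 ++ [rows.1], NM.2 ++ [rows.2]))
    ([], [])

-- ===== PRECONDITION & SPEC =====
def Spec_combi_modes (n1 : Int) (m1 : Int) (nb_f : Int) (out : List (List Int) × List (List Int)) : Prop := out = combi_modes_alt n1 m1 nb_f
instance (n1 : Int) (m1 : Int) (nb_f : Int) (out : List (List Int) × List (List Int)) : Decidable (Spec_combi_modes n1 m1 nb_f out) := by unfold Spec_combi_modes; infer_instance

-- ===== CLAIM (what is proved, stated in full; the proofs are below) =====
def Claim_equal_combi_modes : Prop := ∀ (n1 : Int) (m1 : Int) (nb_f : Int), Dom_combi_modes n1 m1 nb_f → Spec_combi_modes n1 m1 nb_f (combi_modes n1 m1 nb_f)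

-- ===== LEMMAS AND PROOFS =====

-- the level recurrence of A
def pvExpN : List Int → List Int := fun xs => xs.flatMap (fun n => [n, n + 2, n + 2])
def pvExpM : List Int → List Int := fun xs => xs.flatMap (fun m => [m + 2, m, m + 2])

def pvLvlN (n1 : Int) : Nat → List Int
  | 0 => [n1]
  | j + 1 => pvExpN (pvLvlN n1 j)

def pvLvlM (m1 : Int) : Nat → List Int
  | 0 => [m1]
  | j + 1 => pvExpM (pvLvlM m1 j)

-- the digit counts of B: among the j low base-3 digits of k, those ≠ 0 (resp. ≠ 1)
def pvCntN : Nat → Nat → Int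
  | 0, _ => 0
  | j + 1, k => (if k % 3 ≠ 0 then 1 else 0) + pvCntN j (k / 3)

def pvCntM : Nat → Nat → Int
  | 0, _ => 0
  | j + 1, k => (if k % 3 ≠ 1 then 1 else 0) + pvCntM j (k / 3)

def pvRowN (n1 : Int) (j : Nat) : List Int := (List.range (3 ^ j)).map (fun k => n1 + 2 * pvCntN j k)
def pvRowM (m1 : Int) (j : Nat) : List Int := (List.range (3 ^ j)).map (fun k => m1 + 2 * pvCntM j k)

-- the digit-loop body of B
def pvG : Int × Int × Int → Int × Int × Int := fun acc =>
  let d := PySem.Int.mod acc.2.2 3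
  ((if d ≠ 0 then acc.1 + 1 else acc.1),
   (if d ≠ 1 then acc.2.1 + 1 else acc.2.1),
   PySem.Int.floordiv acc.2.2 3)

theorem pvG_dig (j : Nat) : ∀ (x : Nat) (cn cm : Int),
    pvG^[j] (cn, cm, (x : Int)) = (cn + pvCntN j x, cm + pvCntM j x, ((x / 3 ^ j : Nat) : Int)) := by
  induction j with
  | zero => intro x cn cm; simp [pvCntN, pvCntM]
  | succ j ih =>
    intro x cn cm
    rw [Function.iterate_succ_apply]
    have hg : pvG (cn, cm, (x : Int)) =
        ((if x % 3 ≠ 0 then cn + 1 else cn), (if x % 3 ≠ 1 then cm + 1 else cm), ((x / 3 : Nat) : Int)) := by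
      unfold pvG
      have hm : PySem.Int.mod (x : Int) 3 = ((x % 3 : Nat) : Int) := by
        rw [PySem.Int.mod_eq_emod_of_pos (by norm_num)]; omega
      have hd : PySem.Int.floordiv (x : Int) 3 = ((x / 3 : Nat) : Int) := by
        rw [PySem.Int.floordiv_eq_ediv_of_pos (by norm_num)]; omega
      simp only [hm, hd]
      have h3 : x % 3 = 0 ∨ x % 3 = 1 ∨ x % 3 = 2 := by omega
      rcases h3 with h | h | h <;> simp [h]
    rw [hg, ih]
    rw [Prod.mk.injEq, Prod.mk.injEq]
    refine ⟨?_, ?_, ?_⟩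
    · show _ = cn + pvCntN (j + 1) x
      rw [show pvCntN (j + 1) x = (if x % 3 ≠ 0 then 1 else 0) + pvCntN j (x / 3) from rfl]
      split_ifs <;> ring
    · show _ = cm + pvCntM (j + 1) x
      rw [show pvCntM (j + 1) x = (if x % 3 ≠ 1 then 1 else 0) + pvCntM j (x / 3) from rfl]
      split_ifs <;> ring
    · rw [Nat.div_div_eq_div_mul, ← pow_succ']

theorem pv_range3 (n : Nat) :
    List.range (3 * n) = (List.range n).flatMap (fun k => [3 * k, 3 * k + 1, 3 * k + 2]) := by
  induction n with
  | zero => simp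
  | succ n ih =>
    have h : 3 * (n + 1) = 3 * n + 1 + 1 + 1 := by ring
    rw [h, List.range_succ, List.range_succ, List.range_succ, List.range_succ,
      List.flatMap_append, ← ih]
    simp

theorem pvRowN_succ (n1 : Int) (j : Nat) : pvRowN n1 (j + 1) = pvExpN (pvRowN n1 j) := by
  unfold pvRowN pvExpN
  rw [show (3 : Nat) ^ (j + 1) = 3 * 3 ^ j from by ring, pv_range3, List.map_flatMap,
    List.flatMap_map]
  apply List.flatMap_congr
  intro k _
  have e0 : pvCntN (j + 1) (3 * k) = pvCntN j k := by
    rw [show pvCntN (j + 1) (3 * k) = (if (3 * k) % 3 ≠ 0 then 1 else 0) + pvCntN j ((3 * k) / 3) from rfl]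
    have h1 : (3 * k) % 3 = 0 := by omega
    have h2 : (3 * k) / 3 = k := by omega
    simp [h1, h2]
  have e1 : pvCntN (j + 1) (3 * k + 1) = 1 + pvCntN j k := by
    rw [show pvCntN (j + 1) (3 * k + 1) = (if (3 * k + 1) % 3 ≠ 0 then 1 else 0) + pvCntN j ((3 * k + 1) / 3) from rfl]
    have h1 : (3 * k + 1) % 3 = 1 := by omega
    have h2 : (3 * k + 1) / 3 = k := by omega
    simp [h1, h2]
  have e2 : pvCntN (j + 1) (3 * k + 2) = 1 + pvCntN j k := by
    rw [show pvCntN (j + 1) (3 * k + 2) = (if (3 * k + 2) % 3 ≠ 0 then 1 else 0) + pvCntN j ((3 * k + 2) / 3) from rfl]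
    have h1 : (3 * k + 2) % 3 = 2 := by omega
    have h2 : (3 * k + 2) / 3 = k := by omega
    simp [h1, h2]
  simp [e0, e1, e2]
  ring

theorem pvRowM_succ (m1 : Int) (j : Nat) : pvRowM m1 (j + 1) = pvExpM (pvRowM m1 j) := by
  unfold pvRowM pvExpM
  rw [show (3 : Nat) ^ (j + 1) = 3 * 3 ^ j from by ring, pv_range3, List.map_flatMap,
    List.flatMap_map]
  apply List.flatMap_congr
  intro k _
  have e0 : pvCntM (j + 1) (3 * k) = 1 + pvCntM j k := by
    rw [show pvCntM (j + 1) (3 * k) = (if (3 * k) % 3 ≠ 1 then 1 else 0) + pvCntM j ((3 * k) / 3) from rfl]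
    have h1 : (3 * k) % 3 = 0 := by omega
    have h2 : (3 * k) / 3 = k := by omega
    simp [h1, h2]
  have e1 : pvCntM (j + 1) (3 * k + 1) = pvCntM j k := by
    rw [show pvCntM (j + 1) (3 * k + 1) = (if (3 * k + 1) % 3 ≠ 1 then 1 else 0) + pvCntM j ((3 * k + 1) / 3) from rfl]
    have h1 : (3 * k + 1) % 3 = 1 := by omega
    have h2 : (3 * k + 1) / 3 = k := by omega
    simp [h1, h2]
  have e2 : pvCntM (j + 1) (3 * k + 2) = 1 + pvCntM j k := by
    rw [show pvCntM (j + 1) (3 * k + 2) = (if (3 * k + 2) % 3 ≠ 1 then 1 else 0) + pvCntM j ((3 * k + 2) / 3) from rfl]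
    have h1 : (3 * k + 2) % 3 = 2 := by omega
    have h2 : (3 * k + 2) / 3 = k := by omega
    simp [h1, h2]
  simp [e0, e1, e2]
  ring

theorem pvLvl_eq_rowN (n1 : Int) (j : Nat) : pvLvlN n1 j = pvRowN n1 j := by
  induction j with
  | zero => simp [pvLvlN, pvRowN, pvCntN]
  | succ j ih => rw [show pvLvlN n1 (j + 1) = pvExpN (pvLvlN n1 j) from rfl, ih, ← pvRowN_succ]

theorem pvLvl_eq_rowM (m1 : Int) (j : Nat) : pvLvlM m1 j = pvRowM m1 j := by
  induction j with
  | zero => simp [pvLvlM, pvRowM, pvCntM]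
  | succ j ih => rw [show pvLvlM m1 (j + 1) = pvExpM (pvLvlM m1 j) from rfl, ih, ← pvRowM_succ]

theorem pvA_fold (n1 m1 : Int) (L : Nat) :
    (PySem.List.pyRange 0 (L : Int) 1).foldl
      (fun NM i =>
        let ajout_n := (PySem.List.pyGetD NM.1 i []).foldl (fun acc n => acc ++ [n, n + 2, n + 2]) []
        let ajout_m := (PySem.List.pyGetD NM.2 i []).foldl (fun acc m => acc ++ [m + 2, m, m + 2]) []
        (NM.1 ++ [ajout_n], NM.2 ++ [ajout_m]))
      ([[n1]], [[m1]])
    = ((List.range (L + 1)).map (pvLvlN n1), (List.range (L + 1)).map (pvLvlM m1)) := by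
  induction L with
  | zero =>
    simp [PySem.List.pyRange_one_eq_nil, pvLvlN, pvLvlM]
  | succ L ih =>
    rw [show ((L + 1 : Nat) : Int) = (L : Int) + 1 from by push_cast; ring,
      PySem.List.pyRange_one_succ_right (by positivity), List.foldl_append, ih]
    simp only [List.foldl_cons, List.foldl_nil, PySem.List.pyGetD_natCast]
    rw [PySem.List.getD_map_range _ _ _ _ (by omega), PySem.List.getD_map_range _ _ _ _ (by omega),
      PySem.List.foldl_append_eq_flatMap, PySem.List.foldl_append_eq_flatMap]
    simp [List.range_succ, pvLvlN, pvLvlM, pvExpN, pvExpM]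

theorem pv_row_inner (n1 m1 : Int) (j : Nat) :
    (PySem.List.pyRange 0 ((3 : Int) ^ ((j : Int)).toNat) 1).foldl
      (fun (rows : List Int × List Int) k =>
        let c := (PySem.List.pyRange 0 ((j : Int)) 1).foldl
          (fun (acc : Int × Int × Int) _ =>
            let d := PySem.Int.mod acc.2.2 3
            ((if d ≠ 0 then acc.1 + 1 else acc.1),
             (if d ≠ 1 then acc.2.1 + 1 else acc.2.1),
             PySem.Int.floordiv acc.2.2 3))
          (0, 0, k)
        (rows.1 ++ [n1 + 2 * c.1], rows.2 ++ [m1 + 2 * c.2.1]))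
      (([], []) : List Int × List Int)
    = (pvRowN n1 j, pvRowM m1 j) := by
  have hlam : (fun (acc : Int × Int × Int) (_ : Int) =>
      let d := PySem.Int.mod acc.2.2 3
      ((if d ≠ 0 then acc.1 + 1 else acc.1),
       (if d ≠ 1 then acc.2.1 + 1 else acc.2.1),
       PySem.Int.floordiv acc.2.2 3)) = (fun a _ => pvG a) := rfl
  have hval : ∀ k : Nat,
      (List.map (fun k => ((k : Nat) : Int)) (List.range j)).foldl
        (fun (acc : Int × Int × Int) _ =>
          let d := PySem.Int.mod acc.2.2 3
          ((if d ≠ 0 then acc.1 + 1 else acc.1),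
           (if d ≠ 1 then acc.2.1 + 1 else acc.2.1),
           PySem.Int.floordiv acc.2.2 3))
        (0, 0, (k : Int))
      = (pvCntN j k, pvCntM j k, ((k / 3 ^ j : Nat) : Int)) := by
    intro k
    rw [hlam, List.foldl_const]
    simp only [List.length_map, List.length_range]
    rw [pvG_dig]
    simp
  rw [show ((j : Int)).toNat = j from Int.toNat_natCast j,
    show ((3 : Int) ^ j) = ((3 ^ j : Nat) : Int) from by push_cast; ring,
    PySem.List.pyRange_zero_natCast (3 ^ j), PySem.List.pyRange_zero_natCast j, List.foldl_map]
  have hbody : (fun (rows : List Int × List Int) (k : Nat) =>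
      let c := (List.map (fun k => ((k : Nat) : Int)) (List.range j)).foldl
        (fun (acc : Int × Int × Int) _ =>
          let d := PySem.Int.mod acc.2.2 3
          ((if d ≠ 0 then acc.1 + 1 else acc.1),
           (if d ≠ 1 then acc.2.1 + 1 else acc.2.1),
           PySem.Int.floordiv acc.2.2 3))
        (0, 0, (k : Int))
      (rows.1 ++ [n1 + 2 * c.1], rows.2 ++ [m1 + 2 * c.2.1]))
    = (fun (rows : List Int × List Int) (k : Nat) =>
      (rows.1 ++ [n1 + 2 * pvCntN j k], rows.2 ++ [m1 + 2 * pvCntM j k])) := by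
    funext rows k
    simp only [hval k]
  rw [hbody, PySem.List.foldl_prod_mk (fun a k => a ++ [n1 + 2 * pvCntN j k])
      (fun b k => b ++ [m1 + 2 * pvCntM j k]),
    PySem.List.foldl_append_singleton_eq_map, PySem.List.foldl_append_singleton_eq_map]
  simp [pvRowN, pvRowM]

theorem pvB_fold (n1 m1 : Int) (L : Nat) :
    (PySem.List.pyRange 0 (L : Int) 1).foldl
      (fun NM i =>
        let rows := (PySem.List.pyRange 0 ((3 : Int) ^ i.toNat) 1).foldl
          (fun (rows : List Int × List Int) k =>
            let c := (PySem.List.pyRange 0 i 1).foldl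
              (fun (acc : Int × Int × Int) _ =>
                let d := PySem.Int.mod acc.2.2 3
                ((if d ≠ 0 then acc.1 + 1 else acc.1),
                 (if d ≠ 1 then acc.2.1 + 1 else acc.2.1),
                 PySem.Int.floordiv acc.2.2 3))
              (0, 0, k)
            (rows.1 ++ [n1 + 2 * c.1], rows.2 ++ [m1 + 2 * c.2.1]))
          (([], []) : List Int × List Int)
        (NM.1 ++ [rows.1], NM.2 ++ [rows.2]))
      ([], [])
    = ((List.range L).map (pvRowN n1), (List.range L).map (pvRowM m1)) := by
  induction L with
  | zero => simp [PySem.List.pyRange_one_eq_nil]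
  | succ L ih =>
    rw [show ((L + 1 : Nat) : Int) = (L : Int) + 1 from by push_cast; ring,
      PySem.List.pyRange_one_succ_right (by positivity), List.foldl_append, ih]
    simp only [List.foldl_cons, List.foldl_nil]
    rw [pv_row_inner n1 m1 L]
    simp [List.range_succ]

-- ===== VERDICT (by name: the statement is the Claim_ definition above) =====
theorem combi_modes_spec : Claim_equal_combi_modes := by
  intro n1 m1 nb_f _
  unfold Spec_combi_modes combi_modes combi_modes_alt
  have h1 : PySem.List.pyRange 0 nb_f 1 = PySem.List.pyRange 0 ((nb_f.toNat : Nat) : Int) 1 := by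
    have h : (nb_f - 0).toNat = (((nb_f.toNat : Nat) : Int) - 0).toNat := by omega
    rw [PySem.List.pyRange_one, PySem.List.pyRange_one, h]
  have h2 : max nb_f 0 + 1 = ((nb_f.toNat + 1 : Nat) : Int) := by omega
  rw [h1, pvA_fold, h2, pvB_fold]
  rw [Prod.mk.injEq]
  constructor <;> (apply List.map_congr_left; intro j _)
  · exact pvLvl_eq_rowN n1 j
  · exact pvLvl_eq_rowM m1 j
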